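-- pv_equiv track=rewrite | github.com/brineryte/adventofcode | 2021/solutions/solution4.py | findEarliestWin
-- ===== SOURCE A (Python) =====
-- def findEarliestWin(nums, combinations):
--     earliestWinIndex = len(nums)
--     winningCombo = set()
--
--     for index in range(len(nums)):
--         setNums = set(nums[:index])
--         for combo in combinations:
--             setCombo = set(combo)
--             if setCombo.issubset(setNums):
--                 earliestWinIndex = index
--                 winningCombo = setCombo
--                 return earliestWinIndex, winningCombo
--
--     return earliestWinIndex, winningCombo
-- ===== SOURCE B (Python) =====
-- def findEarliestWin(nums, combinations):
--     first = {}
--     for i, x in enumerate(nums):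
--         first.setdefault(x, i)
--     best = len(nums)
--     bestCombo = set()
--     for combo in combinations:
--         need = 0
--         ok = True
--         for x in combo:
--             j = first.get(x)
--             if j is None:
--                 ok = False
--                 break
--             if j + 1 > need:
--                 need = j + 1
--         if ok and need < best:
--             best = need
--             bestCombo = set(combo)
--     return best, bestCombo
-- ===== Notes on version B (the rewrite author's own statement) =====
-- stated objective: faster
-- what changed: Instead of growing a prefix set index by index and re-testing every combination against it (A), B builds a first-occurrence-index dict once, computes each combination's winning index in closed form as max(first[x]+1), and takes the minimum with first-combo tie-break.
import Mathlib
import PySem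

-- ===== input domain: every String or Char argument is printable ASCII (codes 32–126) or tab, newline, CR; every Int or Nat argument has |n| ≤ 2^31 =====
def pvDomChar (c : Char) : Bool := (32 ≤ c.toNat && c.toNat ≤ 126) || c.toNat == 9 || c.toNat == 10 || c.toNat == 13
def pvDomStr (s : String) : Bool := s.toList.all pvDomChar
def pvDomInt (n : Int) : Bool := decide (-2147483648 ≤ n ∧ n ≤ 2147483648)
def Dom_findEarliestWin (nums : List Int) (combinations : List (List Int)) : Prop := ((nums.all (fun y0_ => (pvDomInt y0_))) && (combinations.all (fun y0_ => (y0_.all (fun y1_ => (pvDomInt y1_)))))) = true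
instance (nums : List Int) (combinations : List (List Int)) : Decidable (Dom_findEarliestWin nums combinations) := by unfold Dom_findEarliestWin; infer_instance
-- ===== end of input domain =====

-- B replaces A's index-by-index prefix-set rescans by a single first-occurrence index:
-- each combination's winning index is max(first[x]+1) and the minimum (first combo on ties) is taken — same result, asymptotically faster.

-- ===== PORT A =====
-- inner 'for combo in combinations' loop: returns the first winning set(combo), none if no return
def aInner (setNums : PySem.Set Int) : List (List Int) → Option (List Int)
  | [] => none
  | combo :: rest =>
    let setCombo := PySem.Set.ofList combo
    if PySem.Set.issubset setCombo setNums then some setCombo else aInner setNums rest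

-- outer 'for index in range(len(nums))' loop with its early return
def aLoop (nums : List Int) (combinations : List (List Int)) : List Nat → Int × List Int
  | [] => ((nums.length : Int), PySem.Set.empty)
  | index :: rest =>
    let setNums := PySem.Set.ofList (nums.take index)
    match aInner setNums combinations with
    | some setCombo => ((index : Int), setCombo)
    | none => aLoop nums combinations rest

def findEarliestWin (nums : List Int) (combinations : List (List Int)) : Int × List Int :=
  aLoop nums combinations (List.range nums.length)

-- ===== PORT B =====
-- first = {}; for i, x in enumerate(nums): first.setdefault(x, i)
def bFirst (nums : List Int) : PySem.Dict Int Int :=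
  (PySem.List.enumerate nums 0).foldl (fun d p => d.setdefault p.2 p.1) PySem.Dict.empty

-- inner 'for x in combo' loop: need accumulator, none = ok became False (break)
def bNeed (first : PySem.Dict Int Int) : List Int → Int → Option Int
  | [], need => some need
  | x :: xs, need =>
    match first.get? x with
    | none => none
    | some j => bNeed first xs (if j + 1 > need then j + 1 else need)

-- body of 'for combo in combinations'
def bStep (first : PySem.Dict Int Int) (acc : Int × List Int) (combo : List Int) : Int × List Int :=
  match bNeed first combo 0 with
  | some need => if need < acc.1 then (need, PySem.Set.ofList combo) else acc
  | none => acc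

def findEarliestWin_alt (nums : List Int) (combinations : List (List Int)) : Int × List Int :=
  combinations.foldl (bStep (bFirst nums)) ((nums.length : Int), PySem.Set.empty)

-- ===== PRECONDITION & SPEC =====
def Spec_findEarliestWin (nums : List Int) (combinations : List (List Int)) (out : Int × List Int) : Prop := out = findEarliestWin_alt nums combinations
instance (nums : List Int) (combinations : List (List Int)) (out : Int × List Int) : Decidable (Spec_findEarliestWin nums combinations out) := by unfold Spec_findEarliestWin; infer_instance

-- ===== CLAIM (what is proved, stated in full; the proofs are below) =====
def Claim_equal_findEarliestWin : Prop := ∀ (nums : List Int) (combinations : List (List Int)), Dom_findEarliestWin nums combinations → Spec_findEarliestWin nums combinations (findEarliestWin nums combinations)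

-- ===== LEMMAS AND PROOFS =====

-- membership in a prefix ↔ first occurrence before the cut
theorem mem_take_iff_index (nums : List Int) (y : Int) (k : Nat) :
    y ∈ nums.take k ↔ ∃ j, PySem.List.index? nums y = some j ∧ j < k := by
  induction nums generalizing k with
  | nil => simp [PySem.List.index?_eq_idxOf?]
  | cons a t ih =>
    cases k with
    | zero => simp
    | succ k =>
      by_cases hya : a = y
      · subst hya
        rw [PySem.List.index?_cons_self]
        simp [List.take_succ_cons]
      · rw [PySem.List.index?_cons_of_ne t hya, List.take_succ_cons]
        constructor
        · intro hmem
          rcases List.mem_cons.mp hmem with h | h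
          · exact absurd h.symm hya
          · obtain ⟨j, hj, hlt⟩ := (ih k).mp h
            exact ⟨j + 1, by rw [hj]; rfl, by omega⟩
        · rintro ⟨j, hj, hlt⟩
          cases hidx : PySem.List.index? t y with
          | none => rw [hidx] at hj; simp at hj
          | some j0 =>
            rw [hidx] at hj
            obtain rfl : j0 + 1 = j := by simpa using hj
            exact List.mem_cons.mpr (Or.inr ((ih k).mpr ⟨j0, hidx, by omega⟩))

-- lookup in the dict built by setdefault over enumerate
theorem getFold (l : List Int) (s : Int) (d : PySem.Dict Int Int) (y : Int) :
    ((PySem.List.enumerate l s).foldl (fun d p => d.setdefault p.2 p.1) d).get? y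
      = ((d.get? y).or (Option.map (fun t : Nat => s + (t : Int)) (PySem.List.index? l y))) := by
  induction l generalizing s d with
  | nil => simp [PySem.List.enumerate_nil]
  | cons x t ih =>
    rw [PySem.List.enumerate_cons]
    simp only [List.foldl_cons]
    rw [ih]
    by_cases hxy : x = y
    · subst hxy
      rw [PySem.Dict.get?_setdefault_self, PySem.List.index?_cons_self]
      cases hd : d.get? x with
      | none => simp
      | some v => simp
    · rw [PySem.Dict.get?_setdefault_of_ne d s (Ne.symm hxy),
          PySem.List.index?_cons_of_ne t hxy]
      cases hidx : PySem.List.index? t y with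
      | none => rfl
      | some j =>
        cases d.get? y with
        | none => simp; ring
        | some v => rfl

theorem bFirst_get (nums : List Int) (y : Int) :
    (bFirst nums).get? y = Option.map (fun t : Nat => (t : Int)) (PySem.List.index? nums y) := by
  unfold bFirst
  rw [getFold]
  simp

theorem bNeed_ge (first : PySem.Dict Int Int) (c : List Int) (acc m : Int)
    (h : bNeed first c acc = some m) : acc ≤ m := by
  induction c generalizing acc with
  | nil => simp [bNeed] at h; omega
  | cons x t ih =>
    simp only [bNeed] at h
    cases hg : first.get? x with
    | none => rw [hg] at h; simp at h
    | some j =>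
      rw [hg] at h
      have := ih _ h
      split at this <;> omega

theorem bNeed_le_iff (first : PySem.Dict Int Int) (c : List Int) (acc i : Int) :
    (∃ m, bNeed first c acc = some m ∧ m ≤ i)
      ↔ (acc ≤ i ∧ ∀ x ∈ c, ∃ j, first.get? x = some j ∧ j + 1 ≤ i) := by
  induction c generalizing acc with
  | nil => simp [bNeed]
  | cons x t ih =>
    simp only [bNeed]
    cases hg : first.get? x with
    | none =>
      simp only [List.mem_cons]
      constructor
      · rintro ⟨m, hm, _⟩; simp at hm
      · rintro ⟨_, hall⟩
        obtain ⟨j, hj, _⟩ := hall x (Or.inl rfl)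
        rw [hg] at hj; exact absurd hj (by simp)
    | some j =>
      rw [ih]
      simp only [List.mem_cons]
      constructor
      · rintro ⟨hacc, hall⟩
        refine ⟨by split at hacc <;> omega, fun y hy => ?_⟩
        rcases hy with rfl | hy
        · exact ⟨j, hg, by split at hacc <;> omega⟩
        · exact hall y hy
      · rintro ⟨hacc, hall⟩
        obtain ⟨j', hj', hle⟩ := hall x (Or.inl rfl)
        rw [hg] at hj'
        obtain rfl : j = j' := by simpa using hj'
        exact ⟨by split <;> omega, fun y hy => hall y (Or.inr hy)⟩

-- A's subset test at cut k ↔ B's need value is ≤ k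
theorem subset_iff_need (nums : List Int) (c : List Int) (k : Nat) :
    PySem.Set.issubset (PySem.Set.ofList c) (PySem.Set.ofList (nums.take k)) = true
      ↔ ∃ m, bNeed (bFirst nums) c 0 = some m ∧ m ≤ (k : Int) := by
  rw [bNeed_le_iff, PySem.Set.issubset_iff]
  constructor
  · intro h
    refine ⟨by positivity, fun x hx => ?_⟩
    have hmem : x ∈ nums.take k := by
      have := h x (by simp [PySem.Set.mem_ofList, hx])
      simpa [PySem.Set.mem_ofList] using this
    obtain ⟨j, hj, hlt⟩ := (mem_take_iff_index nums x k).mp hmem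
    exact ⟨(j : Int), by rw [bFirst_get, hj]; rfl, by omega⟩
  · rintro ⟨-, hall⟩ x hx
    have hx' : x ∈ c := by simpa [PySem.Set.mem_ofList] using hx
    obtain ⟨j, hj, hle⟩ := hall x hx'
    rw [bFirst_get] at hj
    cases hidx : PySem.List.index? nums x with
    | none => rw [hidx] at hj; simp at hj
    | some jn =>
      rw [hidx] at hj
      obtain rfl : (jn : Int) = j := by simpa using hj
      have : x ∈ nums.take k := (mem_take_iff_index nums x k).mpr ⟨jn, hidx, by omega⟩
      simpa [PySem.Set.mem_ofList] using this

theorem aInner_eq_none_iff (s : PySem.Set Int) (cs : List (List Int)) :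
    aInner s cs = none ↔ ∀ c ∈ cs, PySem.Set.issubset (PySem.Set.ofList c) s = false := by
  induction cs with
  | nil => simp [aInner]
  | cons c cs ih =>
    simp only [aInner]
    by_cases hs : PySem.Set.issubset (PySem.Set.ofList c) s = true
    · simp [hs]
    · rw [if_neg (by simp [hs]), ih]
      simp only [List.mem_cons]
      constructor
      · intro h y hy
        rcases hy with rfl | hy
        · exact Bool.eq_false_iff.mpr hs
        · exact h y hy
      · intro h y hy
        exact h y (Or.inr hy)

-- B's fold is fixed once no remaining combo can beat the accumulator
theorem bfold_fix (first : PySem.Dict Int Int) (cs : List (List Int)) (b : Int) (l : List Int)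
    (h : ∀ c ∈ cs, ∀ m, bNeed first c 0 = some m → ¬ m < b) :
    cs.foldl (bStep first) (b, l) = (b, l) := by
  induction cs with
  | nil => rfl
  | cons c cs ih =>
    have hrest := fun c' hc' => h c' (List.mem_cons_of_mem _ hc')
    cases hn : bNeed first c 0 with
    | none =>
      simp only [List.foldl_cons, bStep, hn]
      exact ih hrest
    | some m =>
      simp only [List.foldl_cons, bStep, hn]
      rw [if_neg (h c List.mem_cons_self m hn)]
      exact ih hrest

-- if A's inner scan at cut k finds a winner, B's fold lands exactly on (k, that set)
theorem bfold_of_aInner_some (nums : List Int) (k : Nat) (sc : List Int) :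
    ∀ cs : List (List Int), aInner (PySem.Set.ofList (nums.take k)) cs = some sc →
      (∀ c ∈ cs, ∀ m, bNeed (bFirst nums) c 0 = some m → (k : Int) ≤ m) →
      ∀ b l, (k : Int) < b → cs.foldl (bStep (bFirst nums)) (b, l) = ((k : Int), sc) := by
  intro cs
  induction cs with
  | nil => intro ha _ _ _ _; simp [aInner] at ha
  | cons c cs ih =>
    intro ha hlo b l hb
    simp only [aInner] at ha
    by_cases hsub : PySem.Set.issubset (PySem.Set.ofList c) (PySem.Set.ofList (nums.take k)) = true
    · -- head combo wins at k
      rw [if_pos hsub] at ha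
      obtain rfl : PySem.Set.ofList c = sc := by simpa using ha
      obtain ⟨m, hm, hmle⟩ := (subset_iff_need nums c k).mp hsub
      obtain rfl : m = (k : Int) := le_antisymm hmle (hlo c List.mem_cons_self m hm)
      simp only [List.foldl_cons, bStep, hm]
      rw [if_pos hb]
      exact bfold_fix _ _ _ _ (fun c' hc' m' hm' =>
        not_lt.mpr (hlo c' (List.mem_cons_of_mem _ hc') m' hm'))
    · -- head combo does not win at k: its need (if any) is > k
      rw [if_neg hsub] at ha
      have hnot : ¬ ∃ m, bNeed (bFirst nums) c 0 = some m ∧ m ≤ (k : Int) := by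
        rw [← subset_iff_need]; simpa using hsub
      have hrec := ih ha (fun c' hc' => hlo c' (List.mem_cons_of_mem _ hc'))
      cases hn : bNeed (bFirst nums) c 0 with
      | none =>
        simp only [List.foldl_cons, bStep, hn]
        exact hrec b l hb
      | some m =>
        have hmk : (k : Int) < m := by
          rcases lt_or_ge (k : Int) m with h | h
          · exact h
          · exact absurd ⟨m, hn, h⟩ hnot
        simp only [List.foldl_cons, bStep, hn]
        by_cases hlt : m < b
        · rw [if_pos hlt]
          exact hrec m (PySem.Set.ofList c) hmk
        · rw [if_neg hlt]
          exact hrec b l hb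

theorem main_loop (nums : List Int) (combos : List (List Int)) (d k : Nat)
    (hdk : k + d = nums.length)
    (hlo : ∀ c ∈ combos, ∀ m, bNeed (bFirst nums) c 0 = some m → (k : Int) ≤ m) :
    aLoop nums combos (List.range' k d) = findEarliestWin_alt nums combos := by
  induction d generalizing k with
  | zero =>
    obtain rfl : k = nums.length := by omega
    unfold findEarliestWin_alt
    simp only [List.range', aLoop]
    rw [bfold_fix _ _ _ _ (fun c hc m hm => not_lt.mpr (hlo c hc m hm))]
  | succ d ih =>
    rw [List.range'_succ]
    simp only [aLoop]
    cases ha : aInner (PySem.Set.ofList (nums.take k)) combos with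
    | some sc =>
      unfold findEarliestWin_alt
      rw [bfold_of_aInner_some nums k sc combos ha hlo ((nums.length : Int)) PySem.Set.empty
            (by omega)]
    | none =>
      apply ih
      · omega
      · intro c hc m hm
        have hge := hlo c hc m hm
        have hnosub := (aInner_eq_none_iff _ _).mp ha c hc
        have hnot : ¬ ∃ m', bNeed (bFirst nums) c 0 = some m' ∧ m' ≤ (k : Int) := by
          rw [← subset_iff_need]; simp [hnosub]
        have : ¬ m ≤ (k : Int) := fun hle => hnot ⟨m, hm, hle⟩
        omega

-- ===== VERDICT (by name: the statement is the Claim_ definition above) =====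
theorem findEarliestWin_spec : Claim_equal_findEarliestWin := by
  intro nums combos _
  unfold Spec_findEarliestWin findEarliestWin
  rw [List.range_eq_range']
  exact main_loop nums combos nums.length 0 (by omega)
    (fun c hc m hm => bNeed_ge _ _ _ _ hm)
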